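-- pv_equiv track=rewrite | github.com/dair-iitd/FloNet | code/gpt/gpt_utils.py | edit_segment_lengths
-- ===== SOURCE A (Python) =====
-- from itertools import chain
--
-- def edit_segment_lengths(sequence, p_len, h_len):
--     sequence[0]=sequence[0][:p_len]
--     a = -1
--     for a in range(1,len(sequence[1:-1])+1,2):
--         if len(list(chain(*sequence[a:-1])))<=h_len:
--             break
--
--     if a ==-1:
--         return sequence
--
--     if a==len(sequence)-2 and len(list(sequence[a]))>h_len:
--         sequence = [sequence[0]] + [[sequence[a][0]]+sequence[a][-h_len+1:]] + [sequence[-1]]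
--     else:
--         sequence = [sequence[0]] + sequence[a:-1] + [sequence[-1]]
--     return sequence
-- ===== SOURCE B (Python) =====
-- def edit_segment_lengths(sequence, p_len, h_len):
--     # trims sequence[0] in place (same side effect as the original)
--     sequence[0] = sequence[0][:p_len]
--     if len(sequence) < 3:
--         return sequence
--     head, last = sequence[0], sequence[-1]
--     mid = sequence[1:-1]
--     total = sum(map(len, mid))
--     d = 0  # number of segments dropped from the front of mid (always a pair at a time)
--     while total > h_len and d + 2 < len(mid):
--         total -= len(mid[d]) + len(mid[d + 1])
--         d += 2
--     kept = mid[d:]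
--     if len(kept) == 1 and len(kept[0]) > h_len:
--         seg = kept[0]
--         kept = [[seg[0]] + seg[-h_len + 1:]]
--     return [head] + kept + [last]
-- ===== Notes on version B (the rewrite author's own statement) =====
-- stated objective: faster
-- what changed: A re-flattens the whole suffix sequence[a:-1] inside the loop for every candidate a; B never builds a flattened list: it sums the middle segment lengths once and then drops segment pairs from the front while decrementing that running total, so each segment is touched O(1) times.
import Mathlib
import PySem

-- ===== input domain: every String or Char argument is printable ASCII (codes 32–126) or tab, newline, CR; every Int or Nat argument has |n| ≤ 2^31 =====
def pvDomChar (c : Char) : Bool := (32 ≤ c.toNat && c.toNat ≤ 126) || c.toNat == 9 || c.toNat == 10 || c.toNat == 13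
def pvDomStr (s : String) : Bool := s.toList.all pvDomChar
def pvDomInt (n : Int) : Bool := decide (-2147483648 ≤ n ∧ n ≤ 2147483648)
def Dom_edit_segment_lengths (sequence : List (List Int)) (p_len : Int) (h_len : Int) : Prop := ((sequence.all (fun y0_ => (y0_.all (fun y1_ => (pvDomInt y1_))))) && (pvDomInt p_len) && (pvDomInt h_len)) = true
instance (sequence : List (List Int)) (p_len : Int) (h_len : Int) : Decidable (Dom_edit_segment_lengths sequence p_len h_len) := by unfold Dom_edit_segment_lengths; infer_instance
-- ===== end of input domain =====

-- B replaces A's scan over odd indices with per-candidate re-flattening of sequence[a:-1]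
-- by a single pair-dropping pass over the middle segments that maintains the remaining total
-- length (asymptotically faster). Both A and B trim sequence[0] in place in Python; the
-- equivalence proved here is about the return value.


-- ===== PORT A =====
-- A's for-loop with break: a holds the last tried index when no break fires, -1 when the range is empty
def pvLoopA (seq : List (List Int)) (h_len : Int) : List Int → Int → Int
  | [], a => a
  | i :: rest, _ =>
    if (((PySem.List.slice seq (some i) (some (-1))).flatMap id).length : Int) ≤ h_len then i
    else pvLoopA seq h_len rest i

def edit_segment_lengths (sequence : List (List Int)) (p_len : Int) (h_len : Int) : List (List Int) :=
  match sequence with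
  | [] => []   -- Python raises IndexError on sequence[0]; excluded by Pre_
  | s0 :: rest =>
    let seq := PySem.List.slice s0 none (some p_len) :: rest
    let a := pvLoopA seq h_len
      (PySem.List.pyRange 1 (((PySem.List.slice seq (some 1) (some (-1))).length : Int) + 1) 2) (-1)
    if a = -1 then seq
    else if a = (seq.length : Int) - 2 ∧ h_len < ((PySem.List.pyGetD seq a []).length : Int) then
      [PySem.List.pyGetD seq 0 []] ++
        [[PySem.List.pyGetD (PySem.List.pyGetD seq a []) 0 0] ++
          PySem.List.slice (PySem.List.pyGetD seq a []) (some (-h_len + 1)) none] ++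
        [PySem.List.pyGetD seq (-1) []]
    else
      [PySem.List.pyGetD seq 0 []] ++ PySem.List.slice seq (some a) (some (-1)) ++
        [PySem.List.pyGetD seq (-1) []]

-- ===== PORT B =====
-- total flattened length of a list of segments (B's 'sum(map(len, mid))')
def pvSumLen (l : List (List Int)) : Int := (l.map (fun s => (s.length : Int))).sum

-- B's while loop: drop pairs of segments from the front while the running total still
-- exceeds h_len and at least one more candidate position remains; returns the drop count d
def pvTrimLoop (mid : List (List Int)) (h_len : Int) (total : Int) (d : Nat) : Nat :=
  if h : h_len < total ∧ d + 2 < mid.length then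
    pvTrimLoop mid h_len
      (total - ((mid.getD d []).length : Int) - ((mid.getD (d + 1) []).length : Int)) (d + 2)
  else d
termination_by mid.length - d
decreasing_by omega

def edit_segment_lengths_alt (sequence : List (List Int)) (p_len : Int) (h_len : Int) : List (List Int) :=
  match sequence with
  | [] => []   -- Python raises IndexError on sequence[0]; excluded by Pre_
  | s0 :: rest =>
    let head := PySem.List.slice s0 none (some p_len)
    if rest.length + 1 < 3 then head :: rest
    else
      let mid := rest.dropLast
      let lastv := rest.getLastD []
      let d := pvTrimLoop mid h_len (pvSumLen mid) 0
      let kept := mid.drop d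
      let kept2 :=
        match kept with
        | [seg] =>
          if h_len < (seg.length : Int) then
            [seg.headD 0 :: PySem.List.slice seg (some (-h_len + 1)) none]
          else [seg]
        | other => other
      head :: (kept2 ++ [lastv])

-- ===== PRECONDITION & SPEC =====
-- Pre_ excludes exactly the inputs on which Python A raises (IndexError): the empty list, and
-- (with h_len < 0, odd length ≥ 3) an empty segment at index len-2, where sequence[a][0] is taken.
def Pre_edit_segment_lengths (sequence : List (List Int)) (p_len : Int) (h_len : Int) : Prop :=
  sequence ≠ [] ∧
  ¬ (h_len < 0 ∧ 3 ≤ sequence.length ∧ sequence.length % 2 = 1 ∧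
      sequence.getD (sequence.length - 2) [[]].headI = [])
instance (sequence : List (List Int)) (p_len : Int) (h_len : Int) : Decidable (Pre_edit_segment_lengths sequence p_len h_len) := by unfold Pre_edit_segment_lengths; infer_instance
def pvWitness_edit_segment_lengths : List (List Int) × Int × Int := ([[1], [2], [3]], 1, 1)

def Spec_edit_segment_lengths (sequence : List (List Int)) (p_len : Int) (h_len : Int) (out : List (List Int)) : Prop := out = edit_segment_lengths_alt sequence p_len h_len
instance (sequence : List (List Int)) (p_len : Int) (h_len : Int) (out : List (List Int)) : Decidable (Spec_edit_segment_lengths sequence p_len h_len out) := by unfold Spec_edit_segment_lengths; infer_instance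

-- ===== CLAIM (what is proved, stated in full; the proofs are below) =====
def Claim_equal_edit_segment_lengths : Prop := ∀ (sequence : List (List Int)) (p_len : Int) (h_len : Int), Dom_edit_segment_lengths sequence p_len h_len → Pre_edit_segment_lengths sequence p_len h_len → Spec_edit_segment_lengths sequence p_len h_len (edit_segment_lengths sequence p_len h_len)

-- ===== LEMMAS AND PROOFS =====

theorem pvSumLen_cons (x : List Int) (l : List (List Int)) :
    pvSumLen (x :: l) = (x.length : Int) + pvSumLen l := by
  simp [pvSumLen]

theorem pv_slice_drop_dropLast {α : Type} (xs : List α) (i : Int) (h0 : 0 ≤ i)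
    (h : i.toNat ≤ xs.length) :
    PySem.List.slice xs (some i) (some (-1)) = (xs.drop i.toNat).dropLast := by
  have h1 : ¬ (i < 0) := by omega
  have hci : PySem.List.clampIdx xs.length i = i.toNat := by
    simp only [PySem.List.clampIdx, if_neg h1]; omega
  simp only [PySem.List.slice, hci, PySem.List.clampIdx_neg_one,
    List.dropLast_eq_take, List.length_drop]
  congr 1
  omega

theorem pv_dropLast_drop {α : Type} (l : List α) (j : Nat) :
    l.dropLast.drop j = (l.drop j).dropLast := by
  simp only [List.dropLast_eq_take, List.drop_take, List.length_drop]
  congr 1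
  omega

-- the flattened length A recomputes is pvSumLen of the slice
theorem pv_flat_len (l : List (List Int)) :
    ((l.flatMap id).length : Int) = pvSumLen l := by
  simp [pvSumLen]
  rfl

-- first element of R satisfying the predicate
def pvFindP (p : Int → Bool) : List Int → Option Int
  | [] => none
  | i :: rest => if p i then some i else pvFindP p rest

-- A's break-loop equals find-with-fallback, given the conditions agree on the scanned list
theorem pv_loop_eq_find (seq : List (List Int)) (h_len : Int) (p : Int → Bool)
    (R : List Int) (init : Int)
    (hc : ∀ i ∈ R, ((((PySem.List.slice seq (some i) (some (-1))).flatMap id).length : Int) ≤ h_len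
        ↔ p i = true)) :
    pvLoopA seq h_len R init = (pvFindP p R).getD (R.getLastD init) := by
  induction R generalizing init with
  | nil => simp [pvLoopA, pvFindP]
  | cons i rest ih =>
      have hci := hc i (by simp)
      by_cases hb : p i = true
      · rw [pvLoopA, if_pos (hci.mpr hb)]
        simp [pvFindP, hb]
      · rw [pvLoopA, if_neg (fun h => hb (hci.mp h))]
        rw [ih i (fun j hj => hc j (by simp [hj]))]
        rw [pvFindP, if_neg hb]
        cases hfind : pvFindP p rest with
        | some k => simp
        | none =>
            rw [Option.getD_none, Option.getD_none, List.getLastD_cons]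

theorem pvFindP_congr (p q : Int → Bool) (R : List Int) (h : ∀ i ∈ R, p i = q i) :
    pvFindP p R = pvFindP q R := by
  induction R with
  | nil => rfl
  | cons j rest ih =>
      rw [pvFindP, pvFindP, h j (by simp), ih (fun i hi => h i (by simp [hi]))]

theorem pvFindP_map_add_two (p : Int → Bool) (L : List Int) :
    pvFindP p (L.map (· + 2)) = (pvFindP (fun i => p (i + 2)) L).map (· + 2) := by
  induction L with
  | nil => rfl
  | cons j rest ih =>
      simp only [List.map_cons, pvFindP]
      split_ifs <;> simp [ih]

theorem pv_getLastD_map_add_two (L : List Int) (x : Int) (h : L ≠ []) :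
    (L.map (· + 2)).getLastD x = L.getLastD x + 2 := by
  induction L with
  | nil => exact absurd rfl h
  | cons j rest ih =>
      cases rest with
      | nil => rfl
      | cons k r => simpa using ih (by simp)

theorem pv_getLastD_default {α : Type} (L : List α) (a b : α) (h : L ≠ []) :
    L.getLastD a = L.getLastD b := by
  induction L with
  | nil => exact absurd rfl h
  | cons j rest ih =>
      cases rest with
      | nil => rfl
      | cons k r => simpa using ih (by simp)

-- range(1, m+1, 2) decomposed: first candidate 1, then the same range shifted by 2
theorem pv_pyRange_two_cons (m : Int) (h : 1 ≤ m) :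
    PySem.List.pyRange 1 (m + 1) 2 = 1 :: (PySem.List.pyRange 1 (m - 1) 2).map (· + 2) := by
  rw [PySem.List.pyRange_of_pos _ _ (by norm_num), PySem.List.pyRange_of_pos _ _ (by norm_num)]
  by_cases hm : m < 3
  · have hm12 : m = 1 ∨ m = 2 := by omega
    rcases hm12 with rfl | rfl <;> norm_num
  · rw [if_pos (by omega : (1:Int) < m + 1), if_pos (by omega : (1:Int) < m - 1)]
    have hc : ((m + 1 - 1 + 2 - 1) / 2).toNat = ((m - 1 - 1 + 2 - 1) / 2).toNat + 1 := by omega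
    rw [hc, List.range_succ_eq_map, List.map_cons, List.map_map, List.map_map]
    norm_num
    intro a _
    ring

theorem pv_pyRange_two_nil (b : Int) (h : b ≤ 1) : PySem.List.pyRange 1 b 2 = [] := by
  rw [PySem.List.pyRange_of_pos _ _ (by norm_num), if_neg (by omega)]
  simp

theorem pv_pyRange_two_ne_nil (m : Int) (h : 1 ≤ m) :
    PySem.List.pyRange 1 (m + 1) 2 ≠ [] := by
  rw [pv_pyRange_two_cons m h]; simp

theorem pvTrimLoop_shift (x y : List Int) (rest : List (List Int)) (h : Int) : ∀ (t : Int) (d : Nat),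
    pvTrimLoop (x :: y :: rest) h t (d + 2) = pvTrimLoop rest h t d + 2 := by
  intro t d
  fun_induction pvTrimLoop rest h t d with
  | case1 t d hc ih =>
      rw [pvTrimLoop]
      rw [dif_pos (by simp; omega)]
      simpa using ih
  | case2 t d hc =>
      rw [pvTrimLoop, dif_neg (by simp; omega)]

theorem pvTrimLoop_bounds (mid : List (List Int)) (h : Int) : ∀ (t : Int) (d : Nat), d < mid.length →
    d ≤ pvTrimLoop mid h t d ∧ pvTrimLoop mid h t d < mid.length := by
  intro t d hd
  fun_induction pvTrimLoop mid h t d with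
  | case1 t d hc ih =>
      have := ih (by omega)
      omega
  | case2 t d hc => omega

-- the key correspondence: A's chosen index a equals B's drop count plus one
theorem pv_key (m : Nat) : ∀ (mid : List (List Int)) (h_len : Int), mid.length = m → 1 ≤ m →
    (pvFindP (fun i => decide (pvSumLen (mid.drop (i.toNat - 1)) ≤ h_len))
        (PySem.List.pyRange 1 ((mid.length : Int) + 1) 2)).getD
      ((PySem.List.pyRange 1 ((mid.length : Int) + 1) 2).getLastD (-1))
    = (pvTrimLoop mid h_len (pvSumLen mid) 0 : Int) + 1 := by
  induction m using Nat.strong_induction_on with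
  | _ m ih =>
    intro mid h_len hm h1
    rw [pv_pyRange_two_cons (mid.length : Int) (by omega)]
    by_cases hp : pvSumLen mid ≤ h_len
    · rw [pvFindP, if_pos (by simpa using hp)]
      rw [pvTrimLoop, dif_neg (by omega)]
      rfl
    · rw [pvFindP, if_neg (by simpa using hp)]
      match mid, hm with
      | [], hm => simp at hm; omega
      | [x], hm =>
          rw [pvTrimLoop, dif_neg (by simp)]
          have h0 : ((([x] : List (List Int)).length : Int)) - 1 = 0 := by simp
          rw [h0, pv_pyRange_two_nil 0 (by omega)]
          rfl
      | [x, y], hm =>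
          rw [pvTrimLoop, dif_neg (by simp)]
          have h0 : ((([x, y] : List (List Int)).length : Int)) - 1 = 1 := by simp
          rw [h0, pv_pyRange_two_nil 1 (by omega)]
          rfl
      | x :: y :: z :: rest, hm =>
          have hm1 : ((x :: y :: z :: rest).length : Int) - 1 = ((z :: rest).length : Int) + 1 := by
            simp
          rw [hm1, pvFindP_map_add_two]
          have hcong : pvFindP (fun i => decide (pvSumLen ((x :: y :: z :: rest).drop ((i + 2).toNat - 1)) ≤ h_len))
                (PySem.List.pyRange 1 (((z :: rest).length : Int) + 1) 2)
              = pvFindP (fun i => decide (pvSumLen ((z :: rest).drop (i.toNat - 1)) ≤ h_len))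
                (PySem.List.pyRange 1 (((z :: rest).length : Int) + 1) 2) := by
            apply pvFindP_congr
            intro i hi
            have hmem := (PySem.List.mem_pyRange_iff_of_pos (by norm_num) i).mp hi
            have hi1 : 1 ≤ i := hmem.1
            have h2 : (i + 2).toNat - 1 = (i.toNat - 1) + 1 + 1 := by omega
            rw [h2, List.drop_succ_cons, List.drop_succ_cons]
          rw [hcong]
          have hstep : pvTrimLoop (x :: y :: z :: rest) h_len (pvSumLen (x :: y :: z :: rest)) 0
              = pvTrimLoop (z :: rest) h_len (pvSumLen (z :: rest)) 0 + 2 := by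
            rw [pvTrimLoop, dif_pos (by refine ⟨by omega, ?_⟩; simp)]
            have harg : pvSumLen (x :: y :: z :: rest)
                - (((x :: y :: z :: rest).getD 0 []).length : Int)
                - (((x :: y :: z :: rest).getD 1 []).length : Int) = pvSumLen (z :: rest) := by
              simp [pvSumLen_cons]
            rw [harg]
            exact pvTrimLoop_shift x y (z :: rest) h_len (pvSumLen (z :: rest)) 0
          rw [hstep]
          have ihz := ih (z :: rest).length (by simp at hm ⊢; omega) (z :: rest) h_len rfl (by simp)
          cases hfind : pvFindP (fun i => decide (pvSumLen ((z :: rest).drop (i.toNat - 1)) ≤ h_len))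
              (PySem.List.pyRange 1 (((z :: rest).length : Int) + 1) 2) with
          | some i =>
              rw [hfind, Option.getD_some] at ihz
              simp only [Option.map_some, Option.getD_some]
              push_cast
              omega
          | none =>
              rw [hfind, Option.getD_none] at ihz
              simp only [Option.map_none, Option.getD_none]
              rw [List.getLastD_cons,
                pv_getLastD_map_add_two _ _ (pv_pyRange_two_ne_nil _ (by simp)),
                pv_getLastD_default _ 1 (-1) (pv_pyRange_two_ne_nil _ (by simp))]
              push_cast
              omega

theorem pv_getLast_eq_getLastD {α : Type} (l : List α) (h : l ≠ []) (d : α) :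
    l.getLast h = l.getLastD d := by
  rw [List.getLastD_eq_getLast?, List.getLast?_eq_some_getLast h]
  rfl

theorem pv_getD_drop {α : Type} (l : List α) : ∀ (k : Nat) (d : α), (l.drop k).headD d = l.getD k d := by
  induction l with
  | nil => intro k d; cases k <;> rfl
  | cons a t ih =>
      intro k d
      cases k with
      | zero => rfl
      | succ k => exact ih k d

-- Python's seg[0] with default: pyGetD at 0 is headD
theorem pv_pyGetD_zero_headD (l : List Int) (d : Int) :
    PySem.List.pyGetD l 0 d = l.headD d := by
  cases l <;> simp [PySem.List.pyGetD_zero]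

-- the main case: nonempty sequence
theorem pv_main_cons (s0 : List Int) (rest : List (List Int)) (p_len h_len : Int) :
    edit_segment_lengths (s0 :: rest) p_len h_len
      = edit_segment_lengths_alt (s0 :: rest) p_len h_len := by
  rw [edit_segment_lengths, edit_segment_lengths_alt]
  set hd : List Int := PySem.List.slice s0 none (some p_len) with hhd
  set seq : List (List Int) := hd :: rest with hseq
  set mid : List (List Int) := rest.dropLast with hmiddef
  have hmid : PySem.List.slice seq (some 1) (some (-1)) = mid := by
    have := pv_slice_drop_dropLast seq 1 (by norm_num) (by simp [hseq])
    simpa [hseq, hmiddef] using this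
  rw [hmid]
  by_cases hshort : rest.length + 1 < 3
  · -- fewer than three items: the scanned range is empty, both return seq unchanged
    rw [if_pos hshort]
    have hmlen : ((mid.length : Int)) + 1 ≤ 1 := by
      simp [hmiddef]; omega
    rw [pv_pyRange_two_nil _ hmlen]
    rw [show pvLoopA seq h_len [] (-1) = -1 from rfl]
    rw [if_pos rfl]
  · rw [if_neg hshort]
    have hrlen : 2 ≤ rest.length := by omega
    have hmlen : mid.length = rest.length - 1 := by simp [hmiddef]
    have hm1 : 1 ≤ mid.length := by omega
    -- characterise A's loop
    have hc : ∀ i ∈ PySem.List.pyRange 1 ((mid.length : Int) + 1) 2,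
        ((((PySem.List.slice seq (some i) (some (-1))).flatMap id).length : Int) ≤ h_len
          ↔ (fun i => decide (pvSumLen (mid.drop (i.toNat - 1)) ≤ h_len)) i = true) := by
      intro i hi
      have hmem := (PySem.List.mem_pyRange_iff_of_pos (by norm_num) i).mp hi
      have hi1 : 1 ≤ i := hmem.1
      have hi2 : i < (mid.length : Int) + 1 := hmem.2.1
      have hslice : PySem.List.slice seq (some i) (some (-1)) = (seq.drop i.toNat).dropLast :=
        pv_slice_drop_dropLast seq i (by omega) (by simp [hseq]; omega)
      have hdrop : seq.drop i.toNat = rest.drop (i.toNat - 1) := by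
        conv_lhs => rw [hseq, show i.toNat = (i.toNat - 1) + 1 from by omega]
        rw [List.drop_succ_cons]
      have hfin : (seq.drop i.toNat).dropLast = mid.drop (i.toNat - 1) := by
        rw [hdrop, hmiddef, pv_dropLast_drop]
      rw [hslice, hfin, pv_flat_len]
      simp
    rw [pv_loop_eq_find seq h_len _ _ (-1) hc,
      pv_key mid.length mid h_len rfl hm1]
    obtain ⟨dstar, hdstar⟩ : ∃ d, pvTrimLoop mid h_len (pvSumLen mid) 0 = d := ⟨_, rfl⟩
    rw [hdstar]
    have hb := pvTrimLoop_bounds mid h_len (pvSumLen mid) 0 (by omega)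
    rw [hdstar] at hb
    have hdlt : dstar < mid.length := hb.2
    rw [if_neg (by omega : ¬ ((dstar : Int) + 1 = -1))]
    -- the shared pieces
    have hgetD0 : PySem.List.pyGetD seq 0 [] = hd := by
      rw [hseq]; exact PySem.List.pyGetD_zero_cons hd rest []
    have hrne : rest ≠ [] := by
      intro hcon
      rw [hcon] at hrlen
      simp at hrlen
    have hlast : PySem.List.pyGetD seq (-1) [] = rest.getLastD [] := by
      rw [PySem.List.pyGetD_neg_one _ _ (by simp [hseq])]
      rw [pv_getLast_eq_getLastD seq _ []]
      show (hd :: rest).getLastD [] = rest.getLastD []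
      rw [List.getLastD_cons]
      exact pv_getLastD_default rest hd [] hrne
    have hget_a : PySem.List.pyGetD seq ((dstar : Int) + 1) [] = mid.getD dstar [] := by
      rw [show ((dstar : Int) + 1) = ((dstar + 1 : Nat) : Int) from by push_cast; ring,
        PySem.List.pyGetD_natCast, hseq, List.getD_cons_succ]
      have hd1 : dstar < rest.length - 1 := by omega
      rw [List.getD_eq_getElem _ _ (by omega), List.getD_eq_getElem _ _ (by omega)]
      exact (List.getElem_dropLast ..).symm
    have hslice_a : PySem.List.slice seq (some ((dstar : Int) + 1)) (some (-1))
        = mid.drop dstar := by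
      rw [show ((dstar : Int) + 1) = ((dstar + 1 : Nat) : Int) from by push_cast; ring]
      rw [pv_slice_drop_dropLast seq _ (by positivity) (by simp [hseq]; omega)]
      rw [show ((dstar + 1 : Nat) : Int).toNat = dstar + 1 from by omega]
      rw [hseq, List.drop_succ_cons, hmiddef, pv_dropLast_drop]
    have hkept_len : (mid.drop dstar).length = mid.length - dstar := by simp
    -- split on the kept middle
    cases hk : mid.drop dstar with
    | nil => rw [hk] at hkept_len; simp at hkept_len; omega
    | cons seg ktail =>
      have hheadD : mid.getD dstar [] = seg := by
        rw [← pv_getD_drop mid dstar [], hk]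
        rfl
      cases ktail with
      | nil =>
          -- kept middle is a single segment: a = len(seq)-2 in A
          have hd1 : dstar = mid.length - 1 := by
            rw [hk] at hkept_len; simp at hkept_len; omega
          have hcond1 : (dstar : Int) + 1 = ((seq.length : Int)) - 2 := by
            simp [hseq]; omega
          rw [hget_a, hheadD, hslice_a, hk]
          by_cases hwrap : h_len < (seg.length : Int)
          · rw [if_pos ⟨hcond1, hwrap⟩]
            rw [hgetD0, hlast, pv_pyGetD_zero_headD]
            simp only [List.cons_append, List.nil_append]
            rw [hdstar, hk]
            simp [hwrap]
          · rw [if_neg (by intro hcc; exact hwrap hcc.2)]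
            rw [hgetD0, hlast]
            simp only [List.cons_append, List.nil_append]
            rw [hdstar, hk]
            simp [hwrap]
      | cons seg2 kt =>
          -- at least two segments kept: a < len(seq)-2 in A, B keeps the suffix as is
          have hd2 : mid.length - dstar ≥ 2 := by
            rw [hk] at hkept_len; simp at hkept_len; omega
          have hcond1 : ¬ ((dstar : Int) + 1 = ((seq.length : Int)) - 2) := by
            simp [hseq]; omega
          rw [if_neg (by intro hcc; exact hcond1 hcc.1)]
          rw [hgetD0, hlast, hslice_a, hk]
          simp only [List.cons_append, List.nil_append]
          rw [hdstar, hk]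
          simp

-- ===== VERDICT (by name: the statement is the Claim_ definition above) =====
theorem edit_segment_lengths_spec : Claim_equal_edit_segment_lengths := by
  intro sequence p_len h_len _hdom _hpre
  unfold Spec_edit_segment_lengths
  cases sequence with
  | nil => rfl
  | cons s0 rest => exact pv_main_cons s0 rest p_len h_len
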